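-- pv_equiv track=rewrite | github.com/trustspirit/alex | backend/ingestion/summarizer.py | _parse_qa
-- ===== SOURCE A (Python) =====
-- def _parse_qa(raw: str) -> list[dict[str, str]]:
--     """Parse ``Q: ...\nA: ...`` formatted text into a list of dicts."""
--     pairs: list[dict[str, str]] = []
--     current_question: str | None = None
--     current_answer: str | None = None
--
--     for line in raw.splitlines():
--         stripped = line.strip()
--         if stripped.startswith("Q:"):
--             # If we have a pending pair, save it first
--             if current_question is not None and current_answer is not None:
--                 pairs.append(
--                     {"question": current_question, "answer": current_answer}
--                 )
--             current_question = stripped[2:].strip()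
--             current_answer = None
--         elif stripped.startswith("A:") and current_question is not None:
--             current_answer = stripped[2:].strip()
--
--     # Save the last pending pair
--     if current_question is not None and current_answer is not None:
--         pairs.append({"question": current_question, "answer": current_answer})
--
--     return pairs
-- ===== SOURCE B (Python) =====
-- def _parse_qa(raw: str) -> list[dict[str, str]]:
--     """Parse ``Q: ...\nA: ...`` formatted text into a list of dicts.
--
--     Segment-based: split the stripped lines into segments, each starting at a
--     'Q:' line and running to the next one (lines before the first 'Q:' are
--     dropped); within a segment the LAST 'A:' line supplies the answer, and a
--     segment without any 'A:' line emits nothing.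
--     """
--     lines = [line.strip() for line in raw.splitlines()]
--     n = len(lines)
--     pairs: list[dict[str, str]] = []
--     i = 0
--     while i < n and not lines[i].startswith("Q:"):
--         i += 1
--     while i < n:
--         question = lines[i][2:].strip()
--         answer = None
--         j = i + 1
--         while j < n and not lines[j].startswith("Q:"):
--             if lines[j].startswith("A:"):
--                 answer = lines[j][2:].strip()
--             j += 1
--         if answer is not None:
--             pairs.append({"question": question, "answer": answer})
--         i = j
--     return pairs
-- ===== Notes on version B (the rewrite author's own statement) =====
-- stated objective: alternative
-- what changed: Replaces A's single stateful scan with pending question/answer variables by a two-level decomposition: segment the stripped lines at 'Q:' headers (dropping any preamble), then scan each segment for its last 'A:' line and emit a pair only for segments that have one.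
import Mathlib
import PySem

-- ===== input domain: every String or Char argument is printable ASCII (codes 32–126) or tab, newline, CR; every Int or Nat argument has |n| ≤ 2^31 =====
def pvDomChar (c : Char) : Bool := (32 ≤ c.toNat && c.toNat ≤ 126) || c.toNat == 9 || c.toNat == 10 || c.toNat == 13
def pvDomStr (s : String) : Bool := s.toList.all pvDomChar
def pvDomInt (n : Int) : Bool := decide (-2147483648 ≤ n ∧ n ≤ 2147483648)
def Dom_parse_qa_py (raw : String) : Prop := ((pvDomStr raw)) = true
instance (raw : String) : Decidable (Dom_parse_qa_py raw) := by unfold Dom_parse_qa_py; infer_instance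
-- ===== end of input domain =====

-- B re-decomposes A's single stateful scan into segmentation at 'Q:' lines plus a
-- per-segment last-'A:' scan (objective: alternative decomposition, same cost).

-- ===== PORT A =====
-- the loop body of A: state = (pairs, current_question, current_answer)
def pvAStep (st : List (List (String × String)) × Option String × Option String)
    (line : String) : List (List (String × String)) × Option String × Option String :=
  let stripped := PySem.Str.strip line
  if PySem.Str.startswith stripped "Q:" then
    let pairs' :=
      match st.2.1, st.2.2 with
      | some q, some a => st.1 ++ [[("question", q), ("answer", a)]]
      | _, _ => st.1
    (pairs', some (PySem.Str.strip (PySem.Str.slice stripped (some 2) none)), none)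
  else if PySem.Str.startswith stripped "A:" && st.2.1.isSome then
    (st.1, st.2.1, some (PySem.Str.strip (PySem.Str.slice stripped (some 2) none)))
  else
    st

def parse_qa_py (raw : String) : List (List (String × String)) :=
  let st := (PySem.Str.splitlines raw).foldl pvAStep ([], none, none)
  match st.2.1, st.2.2 with
  | some q, some a => st.1 ++ [[("question", q), ("answer", a)]]
  | _, _ => st.1

-- ===== PORT B =====
-- content after the 2-char tag, re-stripped (line[2:].strip())
def pvTag (line : String) : String := PySem.Str.strip (PySem.Str.slice line (some 2) none)

def pvNotQ (line : String) : Bool := !PySem.Str.startswith line "Q:"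

-- the inner while-loop of Source B: last 'A:' content seen so far
def pvLastA (a : Option String) (line : String) : Option String :=
  if PySem.Str.startswith line "A:" then some (pvTag line) else a

-- the outer while-loops of Source B over the (already stripped) lines
def pvSegs : List String → List (List (String × String))
  | [] => []
  | l :: rest =>
    if PySem.Str.startswith l "Q:" then
      let body := rest.takeWhile pvNotQ
      let tail := pvSegs (rest.dropWhile pvNotQ)
      match body.foldl pvLastA none with
      | some a => [("question", pvTag l), ("answer", a)] :: tail
      | none => tail
    else
      pvSegs rest
termination_by ls => ls.length
decreasing_by
  · exact Nat.lt_succ_of_le (List.length_dropWhile_le _ _)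
  · exact Nat.lt_succ_of_le (Nat.le_refl _)

def parse_qa_py_alt (raw : String) : List (List (String × String)) :=
  pvSegs ((PySem.Str.splitlines raw).map PySem.Str.strip)

-- ===== PRECONDITION & SPEC =====
def Spec_parse_qa_py (raw : String) (out : List (List (String × String))) : Prop := out = parse_qa_py_alt raw
instance (raw : String) (out : List (List (String × String))) : Decidable (Spec_parse_qa_py raw out) := by unfold Spec_parse_qa_py; infer_instance

-- ===== CLAIM (what is proved, stated in full; the proofs are below) =====
def Claim_equal_parse_qa_py : Prop := ∀ (raw : String), Dom_parse_qa_py raw → Spec_parse_qa_py raw (parse_qa_py raw)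

-- ===== LEMMAS AND PROOFS =====

-- A's step on an already-stripped line (pvAStep line = pvSStep (strip line))
def pvSStep (st : List (List (String × String)) × Option String × Option String)
    (s : String) : List (List (String × String)) × Option String × Option String :=
  if PySem.Str.startswith s "Q:" then
    let pairs' :=
      match st.2.1, st.2.2 with
      | some q, some a => st.1 ++ [[("question", q), ("answer", a)]]
      | _, _ => st.1
    (pairs', some (pvTag s), none)
  else if PySem.Str.startswith s "A:" && st.2.1.isSome then
    (st.1, st.2.1, some (pvTag s))
  else
    st

-- the pending pair, flushed at a new 'Q:' or at end of input
def pvPend (q a : Option String) : List (List (String × String)) :=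
  match q, a with
  | some qv, some av => [[("question", qv), ("answer", av)]]
  | _, _ => []

-- what A's loop appends after state (q, a) while consuming ls
def pvG (q a : Option String) : List String → List (List (String × String))
  | [] => pvPend q a
  | l :: ls =>
    if PySem.Str.startswith l "Q:" then pvPend q a ++ pvG (some (pvTag l)) none ls
    else if PySem.Str.startswith l "A:" && q.isSome then pvG q (some (pvTag l)) ls
    else pvG q a ls

theorem pvG_spec (ls : List String) (pairs : List (List (String × String)))
    (q a : Option String) :
    (let st := ls.foldl pvSStep (pairs, q, a)
     match st.2.1, st.2.2 with
     | some qv, some av => st.1 ++ [[("question", qv), ("answer", av)]]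
     | _, _ => st.1) = pairs ++ pvG q a ls := by
  induction ls generalizing pairs q a with
  | nil =>
    simp only [List.foldl_nil, pvG]
    cases q <;> cases a <;> simp [pvPend]
  | cons l ls ih =>
    simp only [List.foldl_cons, pvG, pvSStep]
    by_cases hq : PySem.Str.startswith l "Q:" = true
    · simp only [hq, if_pos]
      cases q <;> cases a <;> simp_all [pvPend, List.append_assoc]
    · simp only [hq, if_neg, Bool.false_eq_true, not_false_iff]
      by_cases ha : (PySem.Str.startswith l "A:" && q.isSome) = true
      · simp only [ha, if_pos]
        exact ih pairs q (some (pvTag l))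
      · simp only [ha, if_neg, Bool.false_eq_true, not_false_iff]
        exact ih pairs q a

theorem pvG_some (ls : List String) (qv : String) (a : Option String) :
    pvG (some qv) a ls =
      pvPend (some qv) ((ls.takeWhile pvNotQ).foldl pvLastA a) ++
        pvSegs (ls.dropWhile pvNotQ) := by
  induction ls generalizing qv a with
  | nil => simp [pvG, pvSegs]
  | cons l ls ih =>
    by_cases hq : PySem.Str.startswith l "Q:" = true
    · have hnq : pvNotQ l = false := by simp only [pvNotQ, hq, Bool.not_true]
      rw [pvG, if_pos hq, List.takeWhile_cons, List.dropWhile_cons]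
      simp only [hnq, Bool.false_eq_true, if_false, List.foldl_nil]
      congr 1
      rw [pvSegs, if_pos hq, ih (pvTag l) none]
      cases hF : (ls.takeWhile pvNotQ).foldl pvLastA none <;>
        simp [pvPend, hF]
    · have hnq : pvNotQ l = true := by simp only [pvNotQ, Bool.not_eq_true']; simpa using hq
      rw [List.takeWhile_cons, List.dropWhile_cons]
      simp only [hnq, if_true, List.foldl_cons]
      by_cases ha : PySem.Str.startswith l "A:" = true
      · rw [pvG, if_neg hq, if_pos (by rw [ha]; rfl), ih qv (some (pvTag l))]
        have : pvLastA a l = some (pvTag l) := by rw [pvLastA, if_pos ha]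
        rw [this]
      · rw [pvG, if_neg hq, if_neg (by simp only [Bool.and_eq_true]; intro h; exact ha h.1), ih qv a]
        have : pvLastA a l = a := by rw [pvLastA, if_neg ha]
        rw [this]

theorem pvG_none (ls : List String) (a : Option String) :
    pvG none a ls = pvSegs ls := by
  induction ls generalizing a with
  | nil => simp [pvG, pvSegs, pvPend]
  | cons l ls ih =>
    by_cases hq : PySem.Str.startswith l "Q:" = true
    · rw [pvG, if_pos hq, pvSegs, if_pos hq, pvG_some]
      cases hF : (ls.takeWhile pvNotQ).foldl pvLastA none <;>
        simp [pvPend, hF]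
    · rw [pvG, if_neg hq, if_neg (by simp), pvSegs, if_neg hq]
      exact ih a

-- ===== VERDICT (by name: the statement is the Claim_ definition above) =====
theorem parse_qa_py_spec : Claim_equal_parse_qa_py := by
  intro raw _
  unfold Spec_parse_qa_py parse_qa_py parse_qa_py_alt
  have hfun : pvAStep = fun st line => pvSStep st (PySem.Str.strip line) := rfl
  have h : (PySem.Str.splitlines raw).foldl pvAStep ([], none, none) =
      ((PySem.Str.splitlines raw).map PySem.Str.strip).foldl pvSStep ([], none, none) := by
    rw [List.foldl_map, hfun]
  rw [h]
  have := pvG_spec ((PySem.Str.splitlines raw).map PySem.Str.strip) [] none none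
  simpa [pvG_none] using this
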